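-- pv_equiv track=rewrite | github.com/Mvk122/Leetcode-Solutions | minTime.py | mintTime
-- ===== SOURCE A (Python) =====
-- def mintTime(machines, goal):
--     produced = 0
--     days = 0
--     while produced < goal:
--         days += 1
--         for m in machines:
--             if days % m == 0:
--                 produced += 1
--     return days
-- ===== SOURCE B (Python) =====
-- def mintTime(machines, goal):
--     if goal <= 0:
--         return 0
--     lo, hi = 1, goal * min(abs(m) for m in machines)
--     while lo < hi:
--         mid = (lo + hi) // 2
--         if sum(mid // abs(m) for m in machines) >= goal:
--             hi = mid
--         else:
--             lo = mid + 1
--     return lo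
-- ===== Notes on version B (the rewrite author's own statement) =====
-- stated objective: faster
-- what changed: Replaces the day-by-day simulation (incrementing a counter for every machine every day) with a binary search on the number of days, checking feasibility by summing floor(d/|m|).
import Mathlib
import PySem

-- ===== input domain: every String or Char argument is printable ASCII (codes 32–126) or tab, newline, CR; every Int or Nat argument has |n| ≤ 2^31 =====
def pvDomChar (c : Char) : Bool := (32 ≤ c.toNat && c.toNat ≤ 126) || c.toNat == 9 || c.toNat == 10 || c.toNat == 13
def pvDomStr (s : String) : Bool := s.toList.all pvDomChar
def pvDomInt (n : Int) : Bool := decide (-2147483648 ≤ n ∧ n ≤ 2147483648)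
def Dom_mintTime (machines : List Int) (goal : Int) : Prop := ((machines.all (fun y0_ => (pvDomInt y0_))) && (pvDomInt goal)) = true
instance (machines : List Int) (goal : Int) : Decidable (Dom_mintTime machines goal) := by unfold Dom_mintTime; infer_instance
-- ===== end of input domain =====

-- B replaces A's day-by-day simulation with a binary search on the number of days (feasibility check: sum of mid // abs(m)) — objective: faster.

-- ===== PORT A =====
-- the while-loop of A; the fuel argument is only a termination guard (never exhausted on Pre_ inputs)
def mintTimeLoop (machines : List Int) (goal : Int) : Nat → Int → Int → Int
  | 0, _, days => days
  | fuel+1, produced, days =>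
    if produced < goal then
      let days' := days + 1
      let produced' := machines.foldl (fun p m => if PySem.Int.mod days' m = 0 then p + 1 else p) produced
      mintTimeLoop machines goal fuel produced' days'
    else days

def mintTime (machines : List Int) (goal : Int) : Int :=
  mintTimeLoop machines goal (goal.toNat * ((machines.map Int.natAbs).sum + 1) + 1) 0 0

-- ===== PORT B =====
-- the while-loop of B; fuel (hi-lo).toNat is only a termination guard
def mintTimeBSLoop (machines : List Int) (goal : Int) : Nat → Int → Int → Int
  | 0, lo, _ => lo
  | fuel+1, lo, hi =>
    if lo < hi then
      let mid := PySem.Int.floordiv (lo + hi) 2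
      if goal ≤ machines.foldl (fun s m => s + PySem.Int.floordiv mid |m|) 0 then
        mintTimeBSLoop machines goal fuel lo mid
      else
        mintTimeBSLoop machines goal fuel (mid+1) hi
    else lo

def mintTime_alt (machines : List Int) (goal : Int) : Int :=
  if goal ≤ 0 then 0
  else
    match PySem.List.min? (machines.map (fun m => |m|)) (fun x => x) with
    | none => 0  -- Python's min raises ValueError on []; such inputs are outside Pre_
    | some mn =>
      let hi := goal * mn
      mintTimeBSLoop machines goal (hi - 1).toNat 1 hi

-- ===== PRECONDITION & SPEC =====
-- Pre_ excludes exactly the inputs where A does not return: goal > 0 with a zero machine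
-- (ZeroDivisionError) or with no machines (infinite loop).
def Pre_mintTime (machines : List Int) (goal : Int) : Prop :=
  goal ≤ 0 ∨ (machines ≠ [] ∧ (0:Int) ∉ machines)
instance (machines : List Int) (goal : Int) : Decidable (Pre_mintTime machines goal) := by
  unfold Pre_mintTime; infer_instance

def pvWitness_mintTime : List Int × Int := ([2, 3], 5)

def Spec_mintTime (machines : List Int) (goal : Int) (out : Int) : Prop := out = mintTime_alt machines goal
instance (machines : List Int) (goal : Int) (out : Int) : Decidable (Spec_mintTime machines goal out) := by unfold Spec_mintTime; infer_instance

-- ===== CLAIM (what is proved, stated in full; the proofs are below) =====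
def Claim_equal_mintTime : Prop := ∀ (machines : List Int) (goal : Int), Dom_mintTime machines goal → Pre_mintTime machines goal → Spec_mintTime machines goal (mintTime machines goal)

-- ===== LEMMAS AND PROOFS =====

-- total units produced after n whole days: Σ_m ⌊n / |m|⌋
def prodCount (machines : List Int) (n : Nat) : Nat :=
  (machines.map (fun m => n / m.natAbs)).sum

theorem prodCount_zero (ms : List Int) : prodCount ms 0 = 0 := by
  simp [prodCount]

theorem prodCount_mono (ms : List Int) {k k' : Nat} (h : k ≤ k') :
    prodCount ms k ≤ prodCount ms k' := by
  induction ms with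
  | nil => simp [prodCount]
  | cons a t ih =>
    simp only [prodCount, List.map, List.sum_cons] at ih ⊢
    exact Nat.add_le_add (Nat.div_le_div_right h) ih

theorem prodCount_succ (ms : List Int) (k : Nat) :
    prodCount ms (k+1) = prodCount ms k + ms.countP (fun m => decide (m.natAbs ∣ (k+1))) := by
  induction ms with
  | nil => simp [prodCount]
  | cons a t ih =>
    simp only [prodCount, List.map, List.sum_cons, List.countP_cons] at ih ⊢
    rw [Nat.succ_div]
    by_cases hd : a.natAbs ∣ (k+1) <;> simp [hd] <;> omega

theorem mem_le_sum (l : List Nat) (x : Nat) (h : x ∈ l) : x ≤ l.sum := by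
  induction l with
  | nil => simp at h
  | cons a t ih =>
    rcases List.mem_cons.mp h with h1 | h2
    · subst h1; exact Nat.le_add_right _ _
    · exact le_trans (ih h2) (by simp [List.sum_cons])

theorem prodCount_ge (ms : List Int) {m0 : Int} (hm : m0 ∈ ms) (hm0 : m0 ≠ 0) (g : Nat) :
    g ≤ prodCount ms (g * m0.natAbs) := by
  have hmem : (g * m0.natAbs) / m0.natAbs ∈ ms.map (fun m => (g * m0.natAbs) / m.natAbs) :=
    List.mem_map.mpr ⟨m0, hm, rfl⟩
  have h1 : (g * m0.natAbs) / m0.natAbs = g :=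
    Nat.mul_div_cancel g (Int.natAbs_pos.mpr hm0)
  have := mem_le_sum _ _ hmem
  unfold prodCount
  omega

theorem foldl_count (ms : List Int) (k : Nat) (p : Int) :
    ms.foldl (fun p m => if PySem.Int.mod (k : Int) m = 0 then p + 1 else p) p
      = p + (ms.countP (fun m => decide (m.natAbs ∣ k)) : Int) := by
  induction ms generalizing p with
  | nil => simp
  | cons a t ih =>
    have hiff : PySem.Int.mod (k : Int) a = 0 ↔ a.natAbs ∣ k := by
      rw [PySem.Int.mod_eq_zero_iff_dvd, ← Int.natAbs_dvd, Int.natCast_dvd_natCast]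
    simp only [List.foldl_cons, List.countP_cons, ih]
    by_cases hd : a.natAbs ∣ k
    · simp [hiff, hd]; ring
    · simp [hiff, hd]

theorem foldl_sum (ms : List Int) (x : Int) (hx : 0 ≤ x) (h0 : (0:Int) ∉ ms) (s : Int) :
    ms.foldl (fun s m => s + PySem.Int.floordiv x |m|) s = s + (prodCount ms x.toNat : Int) := by
  induction ms generalizing s with
  | nil => simp [prodCount]
  | cons a t ih =>
    have ha : a ≠ 0 := fun e => h0 (e ▸ List.mem_cons_self)
    have h0t : (0:Int) ∉ t := fun hm => h0 (List.mem_cons_of_mem a hm)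
    have habs : (0:Int) < |a| := abs_pos.mpr ha
    have hfd : PySem.Int.floordiv x |a| = ((x.toNat / a.natAbs : Nat) : Int) := by
      rw [PySem.Int.floordiv_eq_ediv_of_pos habs]
      rw [Int.abs_eq_natAbs, Int.natCast_div]
      congr 1
      omega
    rw [List.foldl_cons, hfd, ih h0t]
    simp only [prodCount, List.map, List.sum_cons]
    push_cast
    ring

theorem loopA_eq (ms : List Int) (goal : Int)
    (h : ∃ n, goal ≤ (prodCount ms n : Int)) :
    ∀ (fuel d : Nat), d ≤ Nat.find h → Nat.find h - d ≤ fuel →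
      mintTimeLoop ms goal fuel ((prodCount ms d : Nat) : Int) (d : Int) = (Nat.find h : Int) := by
  intro fuel
  induction fuel with
  | zero =>
    intro d hd hf
    have : d = Nat.find h := by omega
    simp [mintTimeLoop, this]
  | succ fuel ih =>
    intro d hd hf
    simp only [mintTimeLoop]
    by_cases hlt : ((prodCount ms d : Nat) : Int) < goal
    · rw [if_pos hlt]
      have hdL : d < Nat.find h := by
        rcases Nat.eq_or_lt_of_le hd with he | hl
        · exact absurd (he ▸ Nat.find_spec h) (not_le.mpr hlt)
        · exact hl
      have hc : ((d : Nat) : Int) + 1 = (((d+1 : Nat) : Nat) : Int) := by push_cast; ring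
      rw [hc, foldl_count]
      have hp : ((prodCount ms d : Nat) : Int) + (ms.countP (fun m => decide (m.natAbs ∣ (d+1))) : Int)
          = ((prodCount ms (d+1) : Nat) : Int) := by
        rw [prodCount_succ]; push_cast; ring
      rw [hp]
      exact ih (d+1) hdL (by omega)
    · rw [if_neg hlt]
      have hfind : Nat.find h ≤ d := Nat.find_min' h (not_lt.mp hlt)
      have : d = Nat.find h := by omega
      exact_mod_cast congrArg (Nat.cast : Nat → Int) this

theorem loopB_eq (ms : List Int) (goal : Int) (h0 : (0:Int) ∉ ms)
    (h : ∃ n, goal ≤ (prodCount ms n : Int)) :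
    ∀ (fuel : Nat) (lo hi : Int), 0 ≤ lo → lo ≤ (Nat.find h : Int) → (Nat.find h : Int) ≤ hi →
      (hi - lo).toNat ≤ fuel →
      mintTimeBSLoop ms goal fuel lo hi = (Nat.find h : Int) := by
  intro fuel
  induction fuel with
  | zero =>
    intro lo hi h1 h2 h3 h4
    simp only [mintTimeBSLoop]
    omega
  | succ fuel ih =>
    intro lo hi h1 h2 h3 h4
    simp only [mintTimeBSLoop]
    by_cases hlh : lo < hi
    · rw [if_pos hlh]
      obtain ⟨hml, hmh⟩ := PySem.Int.floordiv_two_mid_bounds (le_of_lt hlh)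
      have hmlt : PySem.Int.floordiv (lo + hi) 2 < hi := by
        rw [PySem.Int.floordiv_lt_iff_lt_mul (by norm_num : (0:Int) < 2)]; omega
      rw [foldl_sum ms _ (by omega) h0, zero_add]
      by_cases hP : goal ≤ ((prodCount ms (PySem.Int.floordiv (lo + hi) 2).toNat : Nat) : Int)
      · rw [if_pos hP]
        have hL : Nat.find h ≤ (PySem.Int.floordiv (lo + hi) 2).toNat := Nat.find_min' h hP
        exact ih lo _ h1 h2 (by omega) (by omega)
      · rw [if_neg hP]
        have hL : PySem.Int.floordiv (lo + hi) 2 < (Nat.find h : Int) := by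
          by_contra hcon
          have hle : Nat.find h ≤ (PySem.Int.floordiv (lo + hi) 2).toNat := by omega
          have hmono := prodCount_mono ms hle
          have hspec := Nat.find_spec h
          apply hP
          calc goal ≤ ((prodCount ms (Nat.find h) : Nat) : Int) := hspec
            _ ≤ _ := by exact_mod_cast hmono
        exact ih _ hi (by omega) (by omega) h3 (by omega)
    · rw [if_neg hlh]
      omega

-- ===== VERDICT (by name: the statement is the Claim_ definition above) =====
theorem mintTime_spec : Claim_equal_mintTime := by
  intro ms goal _dom pre
  unfold Spec_mintTime mintTime mintTime_alt
  by_cases hg : goal ≤ 0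
  · rw [if_pos hg]
    simp only [mintTimeLoop]
    rw [if_neg (not_lt.mpr hg)]
  · rw [if_neg hg]
    push_cast at hg
    rcases pre with hle | ⟨hne, h0⟩
    · omega
    obtain ⟨m1, hm1⟩ := List.exists_mem_of_ne_nil ms hne
    have hm1ne : m1 ≠ 0 := fun e => h0 (e ▸ hm1)
    have hgw : ∀ (m : Int), m ∈ ms → m ≠ 0 → goal ≤ ((prodCount ms (goal.toNat * m.natAbs) : Nat) : Int) := by
      intro m hm hmne
      have h := prodCount_ge ms hm hmne goal.toNat
      have : ((goal.toNat : Nat) : Int) ≤ ((prodCount ms (goal.toNat * m.natAbs) : Nat) : Int) := by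
        exact_mod_cast h
      omega
    have hex : ∃ n, goal ≤ ((prodCount ms n : Nat) : Int) :=
      ⟨goal.toNat * m1.natAbs, hgw m1 hm1 hm1ne⟩
    have hLpos : 0 < Nat.find hex := by
      rcases Nat.eq_zero_or_pos (Nat.find hex) with e | p
      · have hs := Nat.find_spec hex
        rw [e, prodCount_zero] at hs
        norm_num at hs
        omega
      · exact p
    -- A side
    have hA : mintTimeLoop ms goal (goal.toNat * ((ms.map Int.natAbs).sum + 1) + 1) 0 0
        = (Nat.find hex : Int) := by
      have hfind : Nat.find hex ≤ goal.toNat * m1.natAbs := Nat.find_min' hex (hgw m1 hm1 hm1ne)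
      have hm1sum : m1.natAbs ≤ (ms.map Int.natAbs).sum :=
        mem_le_sum _ _ (List.mem_map.mpr ⟨m1, hm1, rfl⟩)
      have hfuel : Nat.find hex - 0 ≤ goal.toNat * ((ms.map Int.natAbs).sum + 1) + 1 := by
        have : goal.toNat * m1.natAbs ≤ goal.toNat * ((ms.map Int.natAbs).sum + 1) :=
          Nat.mul_le_mul_left _ (by omega)
        omega
      have := loopA_eq ms goal hex (goal.toNat * ((ms.map Int.natAbs).sum + 1) + 1) 0
        (Nat.zero_le _) hfuel
      rw [prodCount_zero] at this
      exact_mod_cast this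
    rw [hA]
    -- B side
    cases hmn : PySem.List.min? (ms.map (fun m => |m|)) (fun x => x) with
    | none =>
      exact absurd ((PySem.List.min?_eq_none_iff _ _).mp hmn) (by simp [hne])
    | some mn =>
      obtain ⟨m2, hm2, hm2e⟩ := List.mem_map.mp (PySem.List.min?_mem hmn)
      have hm2ne : m2 ≠ 0 := fun e => h0 (e ▸ hm2)
      have hmnpos : 0 < mn := hm2e ▸ abs_pos.mpr hm2ne
      have hfind2 : Nat.find hex ≤ goal.toNat * m2.natAbs := Nat.find_min' hex (hgw m2 hm2 hm2ne)
      have hhi : ((goal.toNat * m2.natAbs : Nat) : Int) = goal * mn := by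
        rw [← hm2e, Int.abs_eq_natAbs]
        push_cast
        rw [Int.toNat_of_nonneg (by omega)]
      have hB := loopB_eq ms goal h0 hex (goal * mn - 1).toNat 1 (goal * mn)
        (by norm_num) (by omega) (by omega) (le_refl _)
      exact hB.symm
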